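-- pv_equiv track=rewrite | github.com/openpbs/openpbs | test/fw/ptl/lib/ptl_batchutils.py | _make_template_formula
-- ===== SOURCE A (Python) =====
-- def _make_template_formula(formula):
--     """
--     Create a template of the formula
--
--     :param formula: Formula for which template is to be created
--     :type formula: str
--     :returns: Template
--     """
--     tformula = []
--     skip = False
--     for c in formula:
--         if not skip and c.isalpha():
--             tformula.append('$')
--             skip = True
--         if c in ('+', '-', '/', ' ', '*', '%'):
--             skip = False
--         tformula.append(c)
--     return "".join(tformula)
-- ===== SOURCE B (Python) =====
-- import re
--
--
-- def _make_template_formula(formula):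
--     """
--     Create a template of the formula
--
--     :param formula: Formula for which template is to be created
--     :type formula: str
--     :returns: Template
--     """
--     pieces = re.split(r'([+\-/ *%])', formula)
--     out = []
--     for p in pieces:
--         for i, ch in enumerate(p):
--             if ch.isalpha():
--                 p = p[:i] + '$' + p[i:]
--                 break
--         out.append(p)
--     return ''.join(out)
-- ===== Notes on version B (the rewrite author's own statement) =====
-- stated objective: faster
-- what changed: Replaces the single stateful per-character Python loop (skip flag reset at separators) with a C-level regex tokenization into content/separator pieces plus a per-piece splice of the marker before the first alphabetic character, joined at the end.
import Mathlib
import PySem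

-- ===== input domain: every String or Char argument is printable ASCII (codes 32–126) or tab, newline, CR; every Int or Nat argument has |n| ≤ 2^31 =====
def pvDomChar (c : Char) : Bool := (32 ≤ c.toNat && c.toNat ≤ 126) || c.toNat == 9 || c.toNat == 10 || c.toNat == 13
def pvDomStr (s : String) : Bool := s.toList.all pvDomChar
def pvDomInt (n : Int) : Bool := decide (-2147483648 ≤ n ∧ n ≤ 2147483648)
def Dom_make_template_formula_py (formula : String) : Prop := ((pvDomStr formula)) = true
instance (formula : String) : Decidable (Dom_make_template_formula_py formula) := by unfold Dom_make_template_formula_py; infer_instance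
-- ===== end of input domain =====

-- B replaces A's single stateful character scan with regex tokenization into
-- content/separator pieces plus a per-piece marker splice (objective: faster, measured).

-- ===== PORT A =====
-- Literal port of A: one pass over the characters carrying (tformula, skip);
-- pvStepA is the loop body.
def pvStepA (st : List Char × Bool) (c : Char) : List Char × Bool :=
  let st := if !st.2 && PySem.Chars.isalpha c then (st.1 ++ ['$'], true) else st
  let st := if c ∈ ['+', '-', '/', ' ', '*', '%'] then (st.1, false) else st
  (st.1 ++ [c], st.2)

def make_template_formula_py (formula : String) : String :=
  let r := formula.toList.foldl pvStepA ([], false)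
  String.ofList r.1

-- ===== PORT B =====
-- re.split(r'([+\-/ *%])', formula): pieces alternate content segments and
-- single-character separators (content pieces may be empty).
def pvSplitKeep : List Char → List (List Char)
  | [] => [[]]
  | c :: rest =>
    if c ∈ ['+', '-', '/', ' ', '*', '%'] then
      [] :: [c] :: pvSplitKeep rest
    else
      match pvSplitKeep rest with
      | s :: ss => (c :: s) :: ss
      | [] => [[c]]

-- splice '$' in front of the first alphabetic character of a piece (break after it)
def pvMark : List Char → List Char
  | [] => []
  | c :: rest => if PySem.Chars.isalpha c then '$' :: c :: rest else c :: pvMark rest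

def make_template_formula_py_alt (formula : String) : String :=
  String.ofList (((pvSplitKeep formula.toList).map pvMark).flatten)

-- ===== PRECONDITION & SPEC =====
def Spec_make_template_formula_py (formula : String) (out : String) : Prop := out = make_template_formula_py_alt formula
instance (formula : String) (out : String) : Decidable (Spec_make_template_formula_py formula out) := by unfold Spec_make_template_formula_py; infer_instance

-- ===== CLAIM (what is proved, stated in full; the proofs are below) =====
def Claim_equal_make_template_formula_py : Prop := ∀ (formula : String), Dom_make_template_formula_py formula → Spec_make_template_formula_py formula (make_template_formula_py formula)

-- ===== LEMMAS AND PROOFS =====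

-- A's loop, written as structural recursion on the character list (accumulator dropped).
def pvAux (skip : Bool) : List Char → List Char
  | [] => []
  | c :: rest =>
    let pre : List Char := if !skip && PySem.Chars.isalpha c then ['$'] else []
    let skip' : Bool := if c ∈ ['+', '-', '/', ' ', '*', '%'] then false else (skip || PySem.Chars.isalpha c)
    pre ++ c :: pvAux skip' rest

theorem pvStepA_spec (acc : List Char) (sk : Bool) (c : Char) :
    pvStepA (acc, sk) c =
      (acc ++ (if !sk && PySem.Chars.isalpha c then ['$'] else []) ++ [c],
       if c ∈ ['+', '-', '/', ' ', '*', '%'] then false else (sk || PySem.Chars.isalpha c)) := by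
  by_cases ha : PySem.Chars.isalpha c = true <;>
    by_cases hs : c ∈ ['+', '-', '/', ' ', '*', '%'] <;> cases sk <;>
      simp [pvStepA, ha, hs]

theorem pvFoldl_eq_aux (l : List Char) (acc : List Char) (sk : Bool) :
    (l.foldl pvStepA (acc, sk)).1 = acc ++ pvAux sk l := by
  induction l generalizing acc sk with
  | nil => simp [pvAux]
  | cons c rest ih =>
    rw [List.foldl_cons, pvStepA_spec, ih]
    simp [pvAux]

theorem pvSplitKeep_ne_nil (l : List Char) : pvSplitKeep l ≠ [] := by
  cases l with
  | nil => simp [pvSplitKeep]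
  | cons c rest =>
    simp only [pvSplitKeep]
    split
    · simp
    · cases h : pvSplitKeep rest <;> simp

-- separator characters are not alphabetic
theorem pvSep_not_alpha (c : Char) (h : c ∈ ['+', '-', '/', ' ', '*', '%']) :
    PySem.Chars.isalpha c = false := by
  fin_cases h <;> decide

-- the key invariant: A's scan equals B's per-piece marking, with the current piece
-- left unmarked exactly when skip is set
theorem pvAux_eq (l : List Char) (sk : Bool) :
    pvAux sk l =
      (if sk then (pvSplitKeep l).headI else pvMark (pvSplitKeep l).headI)
        ++ ((pvSplitKeep l).tail.map pvMark).flatten := by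
  induction l generalizing sk with
  | nil => cases sk <;> simp [pvAux, pvSplitKeep, pvMark]
  | cons c rest ih =>
    by_cases hs : c ∈ ['+', '-', '/', ' ', '*', '%']
    · have hna := pvSep_not_alpha c hs
      cases h : pvSplitKeep rest with
      | nil => exact absurd h (pvSplitKeep_ne_nil rest)
      | cons s ss =>
        cases sk <;>
          simp [pvAux, pvSplitKeep, hs, hna, pvMark, ih false, h]
    · cases h : pvSplitKeep rest with
      | nil => exact absurd h (pvSplitKeep_ne_nil rest)
      | cons s ss =>
        by_cases ha : PySem.Chars.isalpha c = true
        · cases sk <;>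
            simp [pvAux, pvSplitKeep, hs, ha, h, pvMark, ih true]
        · cases sk <;>
            simp [pvAux, pvSplitKeep, hs, ha, h, pvMark, ih true, ih false]

-- ===== VERDICT (by name: the statement is the Claim_ definition above) =====
theorem make_template_formula_py_spec : Claim_equal_make_template_formula_py := by
  intro formula _
  show _ = _
  simp only [make_template_formula_py, make_template_formula_py_alt]
  rw [pvFoldl_eq_aux, pvAux_eq]
  cases h : pvSplitKeep formula.toList with
  | nil => exact absurd h (pvSplitKeep_ne_nil _)
  | cons s ss => simp
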